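-- pv_equiv track=rewrite | github.com/ku4eriavik/InfoSecLabs | SHA256.py | message_to_blocks
-- ===== SOURCE A (Python) =====
-- def message_to_blocks(message):
--     bytes = [int(message[i * 2: (i + 1) * 2], 16) for i in range(len(message) // 2)]
--     binary_message = ''.join(bin(byte)[2:].zfill(8) for byte in bytes)
--     l = len(binary_message)
--     k = (447 - l) % 512
--     padded_message = binary_message + '1' + '0' * k + bin(l)[2:].zfill(64)
--     blocks = []
--     for i in range(len(padded_message) // 512):
--         binary_block = padded_message[i * 512:(i + 1) * 512]
--         block = []
--         for j in range(16):
--             block.append(int(binary_block[j * 32: (j + 1) * 32], 2))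
--         blocks.append(block)
--     return blocks
-- ===== SOURCE B (Python) =====
-- def message_to_blocks(message):
--     # Same hex parse as the original (keeps odd-length truncation and int(,16) leniency).
--     data = [int(message[i * 2: (i + 1) * 2], 16) for i in range(len(message) // 2)]
--     bit_len = 8 * len(data)
--     # Byte-level SHA-256 padding: 0x80, zeros to 56 mod 64, 8-byte big-endian length.
--     padded = data + [0x80] + [0] * ((55 - len(data)) % 64)
--     padded += [(bit_len >> (8 * s)) & 0xFF for s in range(7, -1, -1)]
--     blocks = []
--     for off in range(0, len(padded), 64):
--         chunk = padded[off:off + 64]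
--         blocks.append([(((chunk[4 * j] * 256 + chunk[4 * j + 1]) * 256
--                          + chunk[4 * j + 2]) * 256 + chunk[4 * j + 3])
--                        for j in range(16)])
--     return blocks
-- ===== Notes on version B (the rewrite author's own statement) =====
-- stated objective: simpler
-- what changed: Replaces the intermediate binary-digit string (join of bin().zfill(8), char slicing, int(s,2) per 32-bit word) by direct byte-list arithmetic: append 0x80 and zero bytes, an 8-byte big-endian length field, and build each word from 4 bytes by multiply/add.
import Mathlib
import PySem

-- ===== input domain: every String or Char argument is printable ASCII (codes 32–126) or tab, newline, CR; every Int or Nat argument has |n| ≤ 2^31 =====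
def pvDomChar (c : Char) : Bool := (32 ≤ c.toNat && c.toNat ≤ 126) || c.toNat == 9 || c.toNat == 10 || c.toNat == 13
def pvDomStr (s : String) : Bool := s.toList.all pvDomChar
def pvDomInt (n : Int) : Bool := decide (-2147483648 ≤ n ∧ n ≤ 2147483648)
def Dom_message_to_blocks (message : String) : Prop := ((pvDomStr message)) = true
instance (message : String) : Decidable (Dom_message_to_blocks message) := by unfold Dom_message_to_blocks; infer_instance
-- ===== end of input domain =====

-- B replaces A's intermediate binary-digit string (bin().zfill(8) join, char slicing, int(s,2)
-- per word) by direct byte-list arithmetic (append 0x80/zero bytes/8-byte big-endian length,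
-- words by multiply-add; measured faster in a timing run); equal return values are proved on Pre_.

set_option maxRecDepth 4000

-- ===== PORT A =====
-- shared helper: the identical first line of both Pythons,
-- bytes = [int(message[i*2:(i+1)*2], 16) for i in range(len(message)//2)]
-- (.getD 0 is unreachable under Pre_message_to_blocks, which demands a parsed nonnegative value)
def hexPairs (cs : List Char) : List Int :=
  (PySem.List.pyRange 0 (PySem.Int.floordiv cs.length 2) 1).map (fun i =>
    (PySem.Int.ofCharsBase? (PySem.List.slice cs (some (i*2)) (some ((i+1)*2))) 16).getD 0)

def pyIntBin (cs : List Char) : Int :=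
  cs.foldl (fun acc c => 2*acc + (if c = '1' then 1 else 0)) 0

def bin8 (b : Int) : List Char :=
  PySem.Chars.zfill (PySem.List.slice (PySem.Int.toBinChars0b b) (some 2) none) 8

def message_to_blocks (message : String) : List (List Int) :=
  let bytes := hexPairs message.toList
  let binary_message : List Char := PySem.Chars.join [] (bytes.map (fun b => bin8 b))
  let l : Int := binary_message.length
  let k : Int := PySem.Int.mod (447 - l) 512
  let padded_message : List Char :=
    binary_message ++ ['1'] ++ List.replicate k.toNat '0' ++
      PySem.Chars.zfill (PySem.List.slice (PySem.Int.toBinChars0b l) (some 2) none) 64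
  (PySem.List.pyRange 0 (PySem.Int.floordiv padded_message.length 512) 1).foldl (fun blocks i =>
    let binary_block := PySem.List.slice padded_message (some (i*512)) (some ((i+1)*512))
    blocks ++ [(PySem.List.pyRange 0 16 1).foldl (fun block j =>
      block ++ [pyIntBin (PySem.List.slice binary_block (some (j*32)) (some ((j+1)*32)))]) []]) []

-- ===== PORT B =====
def message_to_blocks_alt (message : String) : List (List Int) :=
  let data := hexPairs message.toList
  let bitLen : Int := 8 * data.length
  let padded1 : List Int := data ++ [128] ++
    List.replicate (PySem.Int.mod (55 - data.length) 64).toNat 0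
  let padded : List Int := padded1 ++
    (PySem.List.pyRange 7 (-1) (-1)).map (fun s => PySem.Int.band (bitLen >>> (8*s).toNat) 255)
  (PySem.List.pyRange 0 padded.length 64).foldl (fun blocks off =>
    let chunk := PySem.List.slice padded (some off) (some (off+64))
    blocks ++ [(PySem.List.pyRange 0 16 1).map (fun j =>
      ((PySem.List.pyGetD chunk (4*j) 0 * 256 + PySem.List.pyGetD chunk (4*j+1) 0) * 256
        + PySem.List.pyGetD chunk (4*j+2) 0) * 256 + PySem.List.pyGetD chunk (4*j+3) 0)]) []

-- ===== PRECONDITION & SPEC =====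
-- Pre_ excludes (a) messages where some 2-char slice fails int(.,16) (A raises ValueError) or
-- parses to a negative byte (then bin() emits '-0b…' and A raises ValueError at int(.,2)); and
-- (b) messages of ≥ 2^61 characters, where the 64-bit length field overflows: no such input is
-- physically realizable (A cannot return on one), it only bounds the arithmetic in the proof.
def Pre_message_to_blocks (message : String) : Prop :=
  message.toList.length < 2305843009213693952 ∧
  ∀ i < message.toList.length / 2,
    0 ≤ (PySem.Int.ofCharsBase? ((message.toList.drop (2*i)).take 2) 16).getD (-1)

instance (message : String) : Decidable (Pre_message_to_blocks message) := by
  unfold Pre_message_to_blocks; infer_instance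

def pvWitness_message_to_blocks : String := "616263"

def Spec_message_to_blocks (message : String) (out : List (List Int)) : Prop :=
  out = message_to_blocks_alt message

instance (message : String) (out : List (List Int)) : Decidable (Spec_message_to_blocks message out) := by
  unfold Spec_message_to_blocks; infer_instance

-- ===== CLAIM (what is proved, stated in full; the proofs are below) =====
def Claim_equal_message_to_blocks : Prop := ∀ (message : String), Dom_message_to_blocks message → Pre_message_to_blocks message → Spec_message_to_blocks message (message_to_blocks message)

-- ===== LEMMAS AND PROOFS =====

def natBits : Nat → Nat → List Char
  | _, 0 => []
  | v, w+1 => natBits (v/2) w ++ [if v % 2 = 1 then '1' else '0']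

theorem natBits_length (v w : Nat) : (natBits v w).length = w := by
  induction w generalizing v with
  | zero => rfl
  | succ w ih => simp [natBits, ih]

theorem natBits_mem {c : Char} {v w : Nat} (h : c ∈ natBits v w) : c = '0' ∨ c = '1' := by
  induction w generalizing v with
  | zero => simp [natBits] at h
  | succ w ih =>
      simp only [natBits, List.mem_append, List.mem_singleton] at h
      rcases h with h | h
      · exact ih h
      · split at h <;> simp_all

theorem natBits_zero (w : Nat) : natBits 0 w = List.replicate w '0' := by
  induction w with
  | zero => rfl
  | succ w ih => simp [natBits, ih, List.replicate_succ' ]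

theorem foldlBin_natBits (w : Nat) : ∀ (v : Nat) (a : Int), v < 2^w →
    (natBits v w).foldl (fun acc c => 2*acc + (if c = '1' then 1 else 0)) a = a*2^w + v := by
  induction w with
  | zero => intro v a h; interval_cases v; simp [natBits]
  | succ w ih =>
      intro v a h
      rw [natBits, List.foldl_append]
      rw [ih (v/2) a (by omega)]
      simp only [List.foldl_cons, List.foldl_nil]
      have h2 : v % 2 = 0 ∨ v % 2 = 1 := by omega
      rcases h2 with h2 | h2
      · rw [show (if (if v % 2 = 1 then '1' else '0') = '1' then (1:Int) else 0) = 0 by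
          rw [h2]; decide]
        rw [pow_succ, ← mul_assoc]
        generalize a * 2 ^ w = b
        omega
      · rw [show (if (if v % 2 = 1 then '1' else '0') = '1' then (1:Int) else 0) = 1 by
          rw [h2]; decide]
        rw [pow_succ, ← mul_assoc]
        generalize a * 2 ^ w = b
        omega

theorem natBits_split (w1 w2 v : Nat) :
    natBits v (w1+w2) = natBits (v / 2^w2) w1 ++ natBits (v % 2^w2) w2 := by
  induction w2 generalizing v with
  | zero => simp [natBits]
  | succ w2 ih =>
      have e1 : v / 2 / 2^w2 = v / 2^(w2+1) := by
        rw [Nat.div_div_eq_div_mul]; ring_nf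
      have e2 : v / 2 % 2^w2 = v % 2^(w2+1) / 2 := by
        rw [pow_succ', Nat.mod_mul_right_div_self]
      have e3 : (v % 2^(w2+1)) % 2 = v % 2 := Nat.mod_mod_of_dvd _ (dvd_pow_self 2 (by omega))
      show natBits v (w1 + w2 + 1) = _
      rw [natBits, ih, natBits]
      rw [e1, e2, e3]
      simp [List.append_assoc]

theorem natBits_pad (p w v : Nat) (h : v < 2^w) :
    natBits v (p + w) = List.replicate p '0' ++ natBits v w := by
  rw [natBits_split, Nat.div_eq_of_lt h, Nat.mod_eq_of_lt h, natBits_zero]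

theorem core_append (f : Nat) : ∀ (n : Nat) (l : List Char),
    Nat.toDigitsCore 2 f n l = Nat.toDigitsCore 2 f n [] ++ l := by
  induction f with
  | zero => intro n l; simp [Nat.toDigitsCore]
  | succ f ih =>
      intro n l
      simp only [Nat.toDigitsCore]
      by_cases h : n / 2 = 0
      · simp [h]
      · simp only [h, if_false]
        rw [ih (n/2) (Nat.digitChar (n%2) :: l), ih (n/2) [Nat.digitChar (n%2)]]
        simp

theorem core_fuel (f : Nat) : ∀ (g n : Nat), n < 2^f → n < 2^g → 0 < f → 0 < g →
    Nat.toDigitsCore 2 f n [] = Nat.toDigitsCore 2 g n [] := by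
  induction f with
  | zero => omega
  | succ f ih =>
      intro g n hf hg _ hg0
      obtain ⟨g', rfl⟩ : ∃ g', g = g' + 1 := ⟨g - 1, by omega⟩
      simp only [Nat.toDigitsCore]
      by_cases h : n / 2 = 0
      · simp [h]
      · simp only [h, if_false]
        rw [core_append f, core_append g']
        have hn2 : 2 ≤ n := by omega
        have hfb : n / 2 < 2^f := by
          have := Nat.pow_succ 2 f
          omega
        have hgb : n / 2 < 2^g' := by
          have := Nat.pow_succ 2 g'
          omega
        have hf0 : 0 < f := by
          by_contra hc
          have : f = 0 := by omega
          subst this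
          simp at hf
          omega
        have hg0' : 0 < g' := by
          by_contra hc
          have : g' = 0 := by omega
          subst this
          simp at hg
          omega
        rw [ih g' (n/2) hfb hgb hf0 hg0']

theorem core_step (f n : Nat) (l : List Char) :
    Nat.toDigitsCore 2 (f+1) n l =
      if n / 2 = 0 then Nat.digitChar (n%2) :: l
      else Nat.toDigitsCore 2 f (n/2) (Nat.digitChar (n%2) :: l) := by
  rfl

theorem toDigits_two_rec (n : Nat) (h : 2 ≤ n) :
    Nat.toDigits 2 n = Nat.toDigits 2 (n/2) ++ [Nat.digitChar (n%2)] := by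
  show Nat.toDigitsCore 2 (n+1) n [] = Nat.toDigitsCore 2 (n/2+1) (n/2) [] ++ [Nat.digitChar (n%2)]
  obtain ⟨m, rfl⟩ : ∃ m, n = m + 1 := ⟨n - 1, by omega⟩
  rw [core_step]
  have hnd : ¬ (m+1) / 2 = 0 := by omega
  rw [if_neg hnd, core_append]
  congr 1
  exact core_fuel (m+1) ((m+1)/2+1) ((m+1)/2)
    (by have := Nat.lt_two_pow_self (n := m+1); omega)
    (by have := Nat.lt_two_pow_self (n := (m+1)/2)
        have := Nat.pow_succ 2 ((m+1)/2)
        omega)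
    (by omega) (by omega)

theorem toDigits_two_eq (n : Nat) :
    Nat.toDigits 2 n = natBits n (Nat.toDigits 2 n).length ∧ n < 2^(Nat.toDigits 2 n).length := by
  induction n using Nat.strong_induction_on with
  | _ n ih =>
    by_cases h : n < 2
    · interval_cases n
      · exact ⟨by decide, by decide⟩
      · exact ⟨by decide, by decide⟩
    · have h2 : 2 ≤ n := by omega
      rw [toDigits_two_rec n h2]
      obtain ⟨ihd, ihb⟩ := ih (n/2) (by omega)
      constructor
      · rw [List.length_append]
        simp only [List.length_singleton]
        have : natBits n ((Nat.toDigits 2 (n/2)).length + 1) =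
            natBits (n/2) (Nat.toDigits 2 (n/2)).length ++ [if n % 2 = 1 then '1' else '0'] := rfl
        rw [this, ← ihd]
        congr 1
        have hm : n % 2 = 0 ∨ n % 2 = 1 := by omega
        rcases hm with hm | hm <;> rw [hm] <;> decide
      · rw [List.length_append, List.length_singleton, pow_succ]
        omega

theorem toDigits_two_len_pos (n : Nat) : 1 ≤ (Nat.toDigits 2 n).length := by
  by_cases h : n < 2
  · interval_cases n <;> decide
  · rw [toDigits_two_rec n (by omega)]
    simp

theorem zfill_toDigits (v w : Nat) (hv : v < 2^w) (hw : 1 ≤ w) :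
    PySem.Chars.zfill (Nat.toDigits 2 v) (w : Int) = natBits v w := by
  obtain ⟨hd, hb⟩ := toDigits_two_eq v
  have hlen : (Nat.toDigits 2 v).length ≤ w := Nat.toDigits_length 2 v w (by omega) hv
  have hpos := toDigits_two_len_pos v
  show PySem.Chars.zfill (Nat.toDigits 2 v) (w : Int) = natBits v w
  rw [PySem.Chars.zfill.eq_def]
  by_cases he : (w : Int) ≤ (Nat.toDigits 2 v).length
  · rw [if_pos he]
    have : (Nat.toDigits 2 v).length = w := by omega
    rw [hd, this]
  · rw [if_neg he]
    obtain ⟨c, rest, hcr⟩ : ∃ c rest, Nat.toDigits 2 v = c :: rest := by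
      rcases hx : Nat.toDigits 2 v with _ | ⟨c, rest⟩
      · rw [hx] at hpos; simp at hpos
      · exact ⟨c, rest, rfl⟩
    rw [hcr]
    simp only []
    have hc01 : c = '0' ∨ c = '1' := by
      apply natBits_mem (v := v) (w := (Nat.toDigits 2 v).length)
      rw [← hd, hcr]; exact List.mem_cons_self
    have hnsign : ¬ (c = '+' ∨ c = '-') := by
      rcases hc01 with rfl | rfl <;> decide
    show (if c = '+' ∨ c = '-' then c :: (List.replicate (((w:Int)).toNat - (c :: rest).length) '0' ++ rest)
      else List.replicate (((w:Int)).toNat - (c :: rest).length) '0' ++ c :: rest) = natBits v w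
    rw [if_neg hnsign, ← hcr]
    have : natBits v w = List.replicate (w - (Nat.toDigits 2 v).length) '0' ++ natBits v (Nat.toDigits 2 v).length := by
      have := natBits_pad (w - (Nat.toDigits 2 v).length) (Nat.toDigits 2 v).length v hb
      rw [← this]
      congr 1
      omega
    rw [this, ← hd]
    congr 2

theorem slice_0b (b : Int) (hb : 0 ≤ b) :
    PySem.List.slice (PySem.Int.toBinChars0b b) (some 2) none = Nat.toDigits 2 b.toNat := by
  rw [PySem.List.slice_from _ (by norm_num : (0:Int) ≤ 2)]
  rw [PySem.Int.toBinChars0b]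
  rw [if_neg (by omega)]
  rfl

theorem bin8_eq (b : Int) (h0 : 0 ≤ b) (h1 : b < 256) : bin8 b = natBits b.toNat 8 := by
  rw [bin8, slice_0b b h0]
  exact zfill_toDigits b.toNat 8 (by omega) (by omega)

theorem join_nil_flatten (ps : List (List Char)) : PySem.Chars.join [] ps = ps.flatten := by
  induction ps with
  | nil => simp [PySem.Chars.join_nil]
  | cons a t ih =>
      cases t with
      | nil => simp [PySem.Chars.join_singleton]
      | cons b u => simp only [PySem.Chars.join_cons_cons, ih, List.flatten_cons]; simp

def natBits8 (b : Int) : List Char := natBits b.toNat 8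

theorem flatten_len (Q : List Int) : ((Q.map natBits8).flatten).length = 8 * Q.length := by
  induction Q with
  | nil => simp
  | cons a t ih => simp [natBits8, natBits_length, ih]; omega

theorem flatten_drop (Q : List Int) (a : Nat) :
    ((Q.map natBits8).flatten).drop (8*a) = (((Q.drop a)).map natBits8).flatten := by
  induction a generalizing Q with
  | zero => simp
  | succ a ih =>
      cases Q with
      | nil => simp
      | cons x xs =>
          simp only [List.map_cons, List.flatten_cons, List.drop_succ_cons]
          have h8 : (natBits8 x).length = 8 := natBits_length _ _
          rw [show 8*(a+1) = (natBits8 x).length + 8*a by omega, List.drop_append]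
          rw [List.drop_eq_nil_of_le (by omega)]
          simp [h8, ih]

theorem flatten_take (Q : List Int) (a : Nat) :
    ((Q.map natBits8).flatten).take (8*a) = (((Q.take a)).map natBits8).flatten := by
  induction a generalizing Q with
  | zero => simp
  | succ a ih =>
      cases Q with
      | nil => simp
      | cons x xs =>
          simp only [List.map_cons, List.flatten_cons, List.take_succ_cons]
          have h8 : (natBits8 x).length = 8 := natBits_length _ _
          rw [show 8*(a+1) = (natBits8 x).length + 8*a by omega, List.take_append]
          rw [List.take_of_length_le (by omega)]
          simp [h8, ih]

theorem natBits_bytes_aux (t : Nat) : ∀ v : Nat,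
    natBits (v % 2^(8*t)) (8*t) =
      (((List.range t).reverse).map (fun s => natBits (v / 2^(8*s) % 256) 8)).flatten := by
  induction t with
  | zero => intro v; simp [natBits]
  | succ t ih =>
      intro v
      have e0 : 8*(t+1) = 8 + 8*t := by omega
      rw [e0, natBits_split]
      have eA : v % 2^(8+8*t) / 2^(8*t) = v / 2^(8*t) % 256 := by
        rw [show (2:Nat)^(8+8*t) = 2^(8*t) * 256 by rw [pow_add]; ring]
        rw [Nat.mod_mul_right_div_self]
      have eB : v % 2^(8+8*t) % 2^(8*t) = v % 2^(8*t) :=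
        Nat.mod_mod_of_dvd _ (pow_dvd_pow 2 (by omega))
      rw [eA, eB, ih v]
      rw [List.range_succ, List.reverse_append]
      simp

theorem natBits_bytes (v : Nat) (hv : v < 2^64) :
    natBits v 64 =
      (((List.range 8).reverse).map (fun s => natBits (v / 2^(8*s) % 256) 8)).flatten := by
  have := natBits_bytes_aux 8 v
  rwa [Nat.mod_eq_of_lt (by norm_num at hv ⊢; omega)] at this

theorem fmod_pos (a b : Int) (h : 0 < b) : PySem.Int.mod a b = a % b := by
  rw [PySem.Int.mod, Int.fmod_eq_emod]
  rw [if_pos (Or.inl (by omega))]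
  ring

theorem pyIntBin_flatten4 (a b c d : Int)
    (ha : 0 ≤ a ∧ a < 256) (hb : 0 ≤ b ∧ b < 256) (hc : 0 ≤ c ∧ c < 256) (hd : 0 ≤ d ∧ d < 256) :
    pyIntBin (natBits8 a ++ (natBits8 b ++ (natBits8 c ++ (natBits8 d ++ [])))) =
      ((a * 256 + b) * 256 + c) * 256 + d := by
  rw [pyIntBin]
  rw [List.foldl_append, List.foldl_append, List.foldl_append, List.foldl_append]
  rw [natBits8, natBits8, natBits8, natBits8]
  rw [foldlBin_natBits 8 a.toNat 0 (by omega)]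
  rw [foldlBin_natBits 8 b.toNat _ (by omega)]
  rw [foldlBin_natBits 8 c.toNat _ (by omega)]
  rw [foldlBin_natBits 8 d.toNat _ (by omega)]
  simp only [List.foldl_nil]
  rw [Int.toNat_of_nonneg ha.1, Int.toNat_of_nonneg hb.1, Int.toNat_of_nonneg hc.1,
    Int.toNat_of_nonneg hd.1]
  ring

theorem word_eq (chunk : List Int) (hc : ∀ x ∈ chunk, 0 ≤ x ∧ x < 256)
    (hlen : chunk.length = 64) (j : Int) (hj0 : 0 ≤ j) (hj : j < 16) :
    pyIntBin (PySem.List.slice ((chunk.map natBits8).flatten) (some (j*32)) (some ((j+1)*32))) =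
      ((PySem.List.pyGetD chunk (4*j) 0 * 256 + PySem.List.pyGetD chunk (4*j+1) 0) * 256
        + PySem.List.pyGetD chunk (4*j+2) 0) * 256 + PySem.List.pyGetD chunk (4*j+3) 0 := by
  obtain ⟨jj, rfl⟩ : ∃ jj : Nat, j = (jj : Int) := ⟨j.toNat, (Int.toNat_of_nonneg hj0).symm⟩
  have hjj : jj < 16 := by exact_mod_cast hj
  rw [PySem.List.slice_toNat _ (by positivity) (by positivity)]
  have e1 : ((jj:Int)*32).toNat = 8*(4*jj) := by omega
  rw [e1]
  have e2 : (((jj:Int)+1)*32).toNat - 8*(4*jj) = 8*4 := by omega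
  rw [e2, flatten_drop, flatten_take]
  have h0 : 4*jj < chunk.length := by omega
  have h1 : 4*jj+1 < chunk.length := by omega
  have h2 : 4*jj+2 < chunk.length := by omega
  have h3 : 4*jj+3 < chunk.length := by omega
  have hseg : (chunk.drop (4*jj)).take 4 =
      [chunk[4*jj], chunk[4*jj+1], chunk[4*jj+2], chunk[4*jj+3]] := by
    rw [List.drop_eq_getElem_cons h0, List.drop_eq_getElem_cons h1, List.drop_eq_getElem_cons h2,
      List.drop_eq_getElem_cons h3]
    rfl
  rw [hseg]
  have g0 : PySem.List.pyGetD chunk (4*(jj:Int)) 0 = chunk[4*jj] := by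
    rw [show 4*(jj:Int) = ((4*jj : Nat) : Int) by push_cast; ring, PySem.List.pyGetD_natCast,
      List.getD_eq_getElem _ _ h0]
  have g1 : PySem.List.pyGetD chunk (4*(jj:Int)+1) 0 = chunk[4*jj+1] := by
    rw [show 4*(jj:Int)+1 = ((4*jj+1 : Nat) : Int) by push_cast; ring, PySem.List.pyGetD_natCast,
      List.getD_eq_getElem _ _ h1]
  have g2 : PySem.List.pyGetD chunk (4*(jj:Int)+2) 0 = chunk[4*jj+2] := by
    rw [show 4*(jj:Int)+2 = ((4*jj+2 : Nat) : Int) by push_cast; ring, PySem.List.pyGetD_natCast,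
      List.getD_eq_getElem _ _ h2]
  have g3 : PySem.List.pyGetD chunk (4*(jj:Int)+3) 0 = chunk[4*jj+3] := by
    rw [show 4*(jj:Int)+3 = ((4*jj+3 : Nat) : Int) by push_cast; ring, PySem.List.pyGetD_natCast,
      List.getD_eq_getElem _ _ h3]
  rw [g0, g1, g2, g3]
  simp only [List.map_cons, List.map_nil, List.flatten_cons, List.flatten_nil]
  exact pyIntBin_flatten4 _ _ _ _ (hc _ (List.getElem_mem h0)) (hc _ (List.getElem_mem h1))
    (hc _ (List.getElem_mem h2)) (hc _ (List.getElem_mem h3))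

theorem range_cast_lemma (q : Nat) :
    PySem.List.pyRange 0 (q:Int) 1 = List.map (fun k : Nat => (k:Int)) (List.range q) := by
  rw [PySem.List.pyRange_one]
  rw [show ((q:Int) - 0).toNat = q by omega]
  exact List.map_congr_left (fun k _ => by simp)

theorem pyRange_64 (q : Nat) :
    PySem.List.pyRange 0 (64*(q:Int)) 64 = List.map (fun k : Nat => 64*(k:Int)) (List.range q) := by
  rw [PySem.List.pyRange_of_pos _ _ (by norm_num : (0:Int) < 64)]
  rcases Nat.eq_zero_or_pos q with rfl | hq
  · simp
  · rw [if_pos (by positivity)]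
    have : ((64*(q:Int) - 0 + 64 - 1) / 64).toNat = q := by
      rw [show 64*(q:Int) - 0 + 64 - 1 = ((64*q + 63 : Nat) : Int) by push_cast; ring]
      rw [show (64:Int) = ((64:Nat):Int) from rfl, Int.ofNat_ediv_ofNat]
      omega
    rw [this]
    exact List.map_congr_left (fun k _ => by simp)

theorem blocks_eq (R : List Int) (hR : ∀ x ∈ R, 0 ≤ x ∧ x < 256) (q : Nat)
    (hq : R.length = 64*q) :
    (PySem.List.pyRange 0 (PySem.Int.floordiv ((R.map natBits8).flatten).length 512) 1).foldl
      (fun blocks i =>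
        blocks ++ [(PySem.List.pyRange 0 16 1).foldl (fun block j =>
          block ++ [pyIntBin (PySem.List.slice
            (PySem.List.slice ((R.map natBits8).flatten) (some (i*512)) (some ((i+1)*512)))
            (some (j*32)) (some ((j+1)*32)))]) []]) []
    = (PySem.List.pyRange 0 (R.length : Int) 64).foldl (fun blocks off =>
        blocks ++ [(PySem.List.pyRange 0 16 1).map (fun j =>
          ((PySem.List.pyGetD (PySem.List.slice R (some off) (some (off+64))) (4*j) 0 * 256
            + PySem.List.pyGetD (PySem.List.slice R (some off) (some (off+64))) (4*j+1) 0) * 256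
            + PySem.List.pyGetD (PySem.List.slice R (some off) (some (off+64))) (4*j+2) 0) * 256
            + PySem.List.pyGetD (PySem.List.slice R (some off) (some (off+64))) (4*j+3) 0)]) [] := by
  have hlen : ((R.map natBits8).flatten).length = 8 * (64 * q) := by
    rw [flatten_len, hq]
  have hM : PySem.Int.floordiv ((R.map natBits8).flatten).length 512 = (q : Int) := by
    rw [hlen, PySem.Int.floordiv, Int.fdiv_eq_ediv_of_nonneg _ (by norm_num)]
    rw [show ((8*(64*q) : Nat) : Int) = (512*q : Nat) by push_cast; ring]
    rw [show (512:Int) = ((512:Nat):Int) from rfl, Int.ofNat_ediv_ofNat]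
    omega
  rw [hM, PySem.List.foldl_append_singleton_eq_map, PySem.List.foldl_append_singleton_eq_map]
  rw [hq, range_cast_lemma]
  rw [show ((64*q : Nat) : Int) = 64*(q:Int) by push_cast; ring, pyRange_64]
  rw [List.map_map, List.map_map]
  simp only [List.nil_append]
  apply List.map_congr_left
  intro k hk
  have hkq : k < q := List.mem_range.mp hk
  simp only [Function.comp_apply]
  -- identify the chunks
  have hchunkA : PySem.List.slice ((R.map natBits8).flatten) (some ((k:Int)*512)) (some (((k:Int)+1)*512))
      = (((R.drop (64*k)).take 64).map natBits8).flatten := by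
    rw [PySem.List.slice_toNat _ (by positivity) (by positivity)]
    rw [show ((k:Int)*512).toNat = 8*(64*k) by omega]
    rw [show (((k:Int)+1)*512).toNat - 8*(64*k) = 8*64 by omega]
    rw [flatten_drop, flatten_take]
  have hchunkB : PySem.List.slice R (some (64*(k:Int))) (some (64*(k:Int)+64))
      = (R.drop (64*k)).take 64 := by
    rw [PySem.List.slice_toNat _ (by positivity) (by positivity)]
    rw [show (64*(k:Int)).toNat = 64*k by omega]
    rw [show (64*(k:Int)+64).toNat - 64*k = 64 by omega]
  have hclen : ((R.drop (64*k)).take 64).length = 64 := by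
    rw [List.length_take, List.length_drop, hq]
    omega
  have hcmem : ∀ x ∈ (R.drop (64*k)).take 64, 0 ≤ x ∧ x < 256 := by
    intro x hx
    exact hR x (List.mem_of_mem_drop (List.mem_of_mem_take hx))
  rw [hchunkA, PySem.List.foldl_append_singleton_eq_map]
  rw [hchunkB]
  simp only [List.nil_append]
  refine List.map_congr_left ?_
  intro j hj
  rw [PySem.List.mem_pyRange_one] at hj
  exact word_eq _ hcmem hclen j hj.1 hj.2

set_option maxHeartbeats 4000000 in
set_option maxRecDepth 10000 in
theorem hex_bound : ∀ a < 127, ∀ b < 127,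
    0 ≤ (PySem.Int.ofCharsBase? [Char.ofNat a, Char.ofNat b] 16).getD (-1) →
    (PySem.Int.ofCharsBase? [Char.ofNat a, Char.ofNat b] 16).getD (-1) < 256 := by decide

theorem hexPairs_eq (cs : List Char) :
    hexPairs cs = (List.range (cs.length/2)).map
      (fun k => (PySem.Int.ofCharsBase? ((cs.drop (2*k)).take 2) 16).getD 0) := by
  rw [hexPairs]
  have hfd : PySem.Int.floordiv (cs.length : Int) 2 = ((cs.length/2 : Nat) : Int) := by
    rw [PySem.Int.floordiv, Int.fdiv_eq_ediv_of_nonneg _ (by norm_num)]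
    rw [show (2:Int) = ((2:Nat):Int) from rfl, Int.ofNat_ediv_ofNat]
  rw [hfd, range_cast_lemma, List.map_map]
  apply List.map_congr_left
  intro k _
  simp only [Function.comp_apply]
  congr 1
  rw [PySem.List.slice_toNat _ (by positivity) (by positivity)]
  rw [show ((k:Int)*2).toNat = 2*k by omega]
  rw [show (((k:Int)+1)*2).toNat - 2*k = 2 by omega]

theorem pair_eq (cs : List Char) (k : Nat) (hk : 2*k+1 < cs.length) :
    (cs.drop (2*k)).take 2 = [cs[2*k], cs[2*k+1]] := by
  rw [List.drop_eq_getElem_cons (by omega), List.drop_eq_getElem_cons hk]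
  rfl

theorem flatten_replicate_bits (z : Nat) :
    (List.replicate z (natBits 0 8)).flatten = List.replicate (8*z) '0' := by
  induction z with
  | zero => simp
  | succ z ih =>
      rw [List.replicate_succ, List.flatten_cons, ih, natBits_zero]
      rw [show 8*(z+1) = 8 + 8*z by omega]
      rw [List.replicate_add]


theorem band_shift (v s : Nat) :
    PySem.Int.band ((v:Int) >>> s) 255 = ((v / 2^s % 256 : Nat) : Int) := by
  rw [show ((v:Int) >>> s) = ((v >>> s : Nat) : Int) from rfl,
    show (255:Int) = ((255:Nat):Int) from rfl, PySem.Int.band_natCast]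
  congr 1
  rw [Nat.shiftRight_eq_div_pow]
  have := Nat.and_two_pow_sub_one_eq_mod (v / 2^s) 8
  norm_num at this
  exact this

theorem bytes_bound (message : String) (hdom : Dom_message_to_blocks message)
    (hpre : Pre_message_to_blocks message) :
    ∀ b ∈ hexPairs message.toList, 0 ≤ b ∧ b < 256 := by
  intro b hb
  rw [hexPairs_eq] at hb
  obtain ⟨k, hk, rfl⟩ := List.mem_map.mp hb
  have hkr : k < message.toList.length / 2 := List.mem_range.mp hk
  have hpair := pair_eq message.toList k (by omega)
  have hget := hpre.2 k hkr
  rw [hpair] at hget ⊢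
  set c0 := message.toList[2*k]
  set c1 := message.toList[2*k+1]
  have hdc : ∀ c ∈ message.toList, c.toNat < 127 := by
    intro c hc
    have := List.all_eq_true.mp hdom c hc
    simp only [pvDomChar, Bool.or_eq_true, Bool.and_eq_true, decide_eq_true_eq, beq_iff_eq] at this
    omega
  have h0 : c0.toNat < 127 := hdc _ (List.getElem_mem _)
  have h1 : c1.toNat < 127 := hdc _ (List.getElem_mem _)
  have hbnd := hex_bound c0.toNat h0 c1.toNat h1
  rw [Char.ofNat_toNat, Char.ofNat_toNat] at hbnd
  have hlt := hbnd hget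
  rcases ho : PySem.Int.ofCharsBase? [c0, c1] 16 with _ | v
  · rw [ho] at hget; norm_num at hget
  · rw [ho] at hget hlt
    simp only [Option.getD_some] at hget hlt ⊢
    exact ⟨hget, hlt⟩

theorem pads_eq (n : Nat) (zt : Nat) (kt : Nat) (hk : kt = 8*zt + 7) (hn : 8*n < 2^64) :
    (['1'] ++ List.replicate kt '0' ++
      PySem.Chars.zfill (PySem.List.slice (PySem.Int.toBinChars0b ((8*n : Nat) : Int)) (some 2) none) 64 : List Char)
    = (natBits8 128 ++ (List.replicate zt (natBits 0 8)).flatten) ++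
      (((List.range 8).reverse).map (fun s => natBits (8*n / 2^(8*s) % 256) 8)).flatten := by
  rw [slice_0b _ (by positivity)]
  rw [Int.toNat_natCast]
  rw [show (64:Int) = ((64:Nat):Int) from rfl]
  rw [zfill_toDigits (8*n) 64 (by norm_num at hn ⊢; omega) (by omega)]
  rw [natBits_bytes _ hn]
  rw [flatten_replicate_bits]
  rw [show (natBits8 128 : List Char) = '1' :: List.replicate 7 '0' by decide]
  rw [hk, show 8*zt+7 = 7+8*zt by omega, List.replicate_add]
  simp

theorem main_eq (message : String) (hdom : Dom_message_to_blocks message)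
    (hpre : Pre_message_to_blocks message) :
    message_to_blocks message = message_to_blocks_alt message := by
  have hP := bytes_bound message hdom hpre
  have hlenP : (hexPairs message.toList).length = message.toList.length / 2 := by
    rw [hexPairs_eq, List.length_map, List.length_range]
  simp only [message_to_blocks, message_to_blocks_alt]
  set P := hexPairs message.toList with hPdef
  set n := P.length with hn
  have hnb : 8*n < 2^64 := by
    have := hpre.1
    rw [hlenP]
    omega
  have hmap : P.map (fun b => bin8 b) = P.map natBits8 := by
    apply List.map_congr_left
    intro b hb
    rw [bin8_eq b (hP b hb).1 (hP b hb).2]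
    rfl
  rw [hmap, join_nil_flatten, flatten_len]
  have hcast : (8*(P.length:Int)) = ((8*P.length : Nat) : Int) := by push_cast; ring
  rw [hcast]
  have hlb : List.map (fun s => PySem.Int.band (((8*P.length : Nat) : Int) >>> (8*s).toNat) 255)
      (PySem.List.pyRange 7 (-1) (-1))
      = ((List.range 8).reverse).map (fun s => ((8*P.length / 2^(8*s) % 256 : Nat) : Int)) := by
    rw [show PySem.List.pyRange 7 (-1) (-1) = [(7:Int),6,5,4,3,2,1,0] from by decide]
    rw [show (List.range 8).reverse = [7,6,5,4,3,2,1,0] from by decide]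
    simp only [List.map_cons, List.map_nil, List.cons.injEq, and_true]
    exact ⟨band_shift _ 56, band_shift _ 48, band_shift _ 40, band_shift _ 32,
      band_shift _ 24, band_shift _ 16, band_shift _ 8, band_shift _ 0⟩
  rw [hlb]
  set zt := (PySem.Int.mod (55 - (P.length:Int)) 64).toNat with hzt
  have hzmod : PySem.Int.mod (55 - (P.length:Int)) 64 = (55 - (P.length:Int)) % 64 :=
    fmod_pos _ _ (by norm_num)
  have hkk : (PySem.Int.mod (447 - ((8*P.length : Nat):Int)) 512).toNat = 8*zt + 7 := by
    rw [fmod_pos _ _ (by norm_num), hzt, hzmod]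
    omega
  rw [hkk]
  set LB := ((List.range 8).reverse).map (fun s => ((8*P.length / 2^(8*s) % 256 : Nat) : Int)) with hLB
  set P' : List Int := P ++ [128] ++ List.replicate zt 0 ++ LB with hP'
  have hbig : (List.map natBits8 P).flatten ++ ['1'] ++ List.replicate (8*zt+7) '0' ++
      PySem.Chars.zfill (PySem.List.slice (PySem.Int.toBinChars0b ((8*P.length : Nat) : Int)) (some 2) none) 64
      = (List.map natBits8 P').flatten := by
    rw [show ((List.map natBits8 P).flatten ++ ['1'] ++ List.replicate (8*zt+7) '0' ++
        PySem.Chars.zfill (PySem.List.slice (PySem.Int.toBinChars0b ((8*P.length : Nat) : Int)) (some 2) none) 64)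
        = (List.map natBits8 P).flatten ++ (['1'] ++ List.replicate (8*zt+7) '0' ++
        PySem.Chars.zfill (PySem.List.slice (PySem.Int.toBinChars0b ((8*P.length : Nat) : Int)) (some 2) none) 64) from by
      simp [List.append_assoc]]
    rw [pads_eq P.length zt (8*zt+7) rfl hnb]
    rw [hP', hLB]
    simp only [List.map_append, List.flatten_append, List.map_replicate]
    rw [List.map_map]
    have : (natBits8 ∘ fun s => ((8*P.length / 2^(8*s) % 256 : Nat) : Int)) =
        (fun s => natBits (8*P.length / 2^(8*s) % 256) 8) := by
      funext s
      simp only [natBits8, Function.comp_apply, Int.toNat_natCast]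
    rw [this]
    have hrep : List.map natBits8 (List.replicate zt (0:Int)) = List.replicate zt (natBits 0 8) := by
      rw [List.map_replicate]
      rfl
    simp [List.append_assoc, natBits8]
  rw [hbig]
  have hR' : ∀ x ∈ P', 0 ≤ x ∧ x < 256 := by
    intro x hx
    rw [hP'] at hx
    simp only [List.mem_append, List.mem_singleton, List.mem_replicate, hLB, List.mem_map] at hx
    rcases hx with ((hx | rfl) | ⟨_, rfl⟩) | ⟨s, _, rfl⟩
    · exact hP x hx
    · norm_num
    · norm_num
    · constructor
      · positivity
      · have : 8*P.length / 2^(8*s) % 256 < 256 := Nat.mod_lt _ (by norm_num)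
        exact_mod_cast this
  have hq : P'.length = 64 * ((P.length + 9 + zt) / 64) := by
    rw [hP', hLB]
    simp only [List.length_append, List.length_singleton, List.length_replicate, List.length_map,
      List.length_reverse, List.length_range]
    rw [hzt, hzmod]
    omega
  exact blocks_eq P' hR' ((P.length + 9 + zt) / 64) hq

-- ===== VERDICT (by name: the statement is the Claim_ definition above) =====
theorem message_to_blocks_spec : Claim_equal_message_to_blocks := by
  intro message hdom hpre
  unfold Spec_message_to_blocks
  exact main_eq message hdom hpre
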